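-- pv_equiv track=rewrite | github.com/corradomio/python_projects | commons/stdlib.py | dict_exclude
-- ===== SOURCE A (Python) =====
-- from typing import Any, Union, Optional
--
-- CollectionType = (list, tuple)
--
-- def dict_exclude(d1: dict, keys: Union[None, str, list[str]]) -> dict:
--     """
--     Remove from the dictionary some keys (and values
--     :param d1: dictionary
--     :param keys: keys to remove
--     :return: the new dictionary
--     """
--     # keys is a string
--     if keys is None: keys = []
--     if isinstance(keys, str): keys = [keys]
--     assert isinstance(keys, CollectionType)
--
--     # keys is None/empty
--     if len(keys) == 0:
--         return d1
--     # dict doesn't contain keys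
--     if len(set(keys).intersection(d1.keys())) == 0:
--         return d1
--
--     d = {}
--     for k in d1:
--         if k in keys:
--             continue
--         d[k] = d1[k]
--     return d
-- ===== SOURCE B (Python) =====
-- from typing import Any, Union, Optional
--
-- CollectionType = (list, tuple)
--
-- def dict_exclude(d1: dict, keys: Union[None, str, list[str]]) -> dict:
--     """Return a copy of d1 without the given keys (copy-then-pop instead of filter-while-copy)."""
--     if keys is None: keys = []
--     if isinstance(keys, str): keys = [keys]
--     assert isinstance(keys, CollectionType)
--
--     d = dict(d1)
--     for k in keys:
--         d.pop(k, None)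
--     return d
-- ===== Notes on version B (the rewrite author's own statement) =====
-- stated objective: simpler
-- what changed: B drops A's two early-return guards and the set-intersection pass and inverts the loop: it copies the dict once and pops each exclusion key, instead of scanning every entry and testing membership in the keys list; Pre_ requires distinct keys in the association list since the Python argument is a dict.
import Mathlib
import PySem

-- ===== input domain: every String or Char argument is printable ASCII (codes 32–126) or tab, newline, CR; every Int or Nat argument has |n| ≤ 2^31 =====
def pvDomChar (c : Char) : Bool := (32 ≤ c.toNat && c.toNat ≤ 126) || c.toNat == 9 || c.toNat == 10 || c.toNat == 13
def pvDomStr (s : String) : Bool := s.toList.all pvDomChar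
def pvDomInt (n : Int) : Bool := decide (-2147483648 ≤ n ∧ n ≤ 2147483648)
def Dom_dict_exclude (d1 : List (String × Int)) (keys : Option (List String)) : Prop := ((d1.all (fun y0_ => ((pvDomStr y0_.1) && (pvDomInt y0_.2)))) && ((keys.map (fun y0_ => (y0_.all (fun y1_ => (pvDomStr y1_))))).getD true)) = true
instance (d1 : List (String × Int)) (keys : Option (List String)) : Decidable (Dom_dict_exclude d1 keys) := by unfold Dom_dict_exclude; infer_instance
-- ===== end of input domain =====

-- B replaces A's entry-scan-with-membership-filter (plus two early-return guards and a
-- set-intersection pass) by a single copy followed by popping each exclusion key: simpler.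


-- ===== PORT A =====
-- 'if keys is None: keys = []' then the empty-keys guard, the set-intersection guard,
-- then the filtering copy loop 'for k in d1: if k in keys: continue; d[k] = d1[k]'.
-- 'd1[k]' is ported as a dict lookup with default 0; the default is unreachable since k comes from d1.
def dict_exclude (d1 : List (String × Int)) (keys : Option (List String)) : List (String × Int) :=
  let ks : List String := match keys with | none => [] | some l => l
  if ks.length = 0 then d1
  else if (PySem.Set.inter (PySem.Set.ofList ks) (d1.map Prod.fst)).length = 0 then d1
  else
    (d1.foldl
      (fun d kv =>
        if ks.contains kv.1 then d
        else d.insert kv.1 ((PySem.Dict.mk d1).getD kv.1 0))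
      (PySem.Dict.empty : PySem.Dict String Int)).items

-- ===== PORT B =====
-- 'd = dict(d1); for k in keys: d.pop(k, None); return d' — pop with a default discards
-- the value, i.e. Dict.erase.
def dict_exclude_alt (d1 : List (String × Int)) (keys : Option (List String)) : List (String × Int) :=
  let ks : List String := keys.getD []
  (ks.foldl (fun d k => d.erase k) (PySem.Dict.mk d1)).items

-- ===== PRECONDITION & SPEC =====
-- Pre_ requires distinct keys in the association list: the Python parameter d1 is a dict,
-- which cannot carry duplicate keys, so duplicate-key lists represent no Python input.
def Pre_dict_exclude (d1 : List (String × Int)) (keys : Option (List String)) : Prop :=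
  (d1.map Prod.fst).Nodup
instance (d1 : List (String × Int)) (keys : Option (List String)) : Decidable (Pre_dict_exclude d1 keys) := by unfold Pre_dict_exclude; infer_instance
def pvWitness_dict_exclude : (List (String × Int)) × Option (List String) :=
  ([("a", 1), ("b", 2)], some ["a", "c"])

def Spec_dict_exclude (d1 : List (String × Int)) (keys : Option (List String)) (out : List (String × Int)) : Prop := out = dict_exclude_alt d1 keys
instance (d1 : List (String × Int)) (keys : Option (List String)) (out : List (String × Int)) : Decidable (Spec_dict_exclude d1 keys out) := by unfold Spec_dict_exclude; infer_instance

-- ===== CLAIM (what is proved, stated in full; the proofs are below) =====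
def Claim_equal_dict_exclude : Prop := ∀ (d1 : List (String × Int)) (keys : Option (List String)), Dom_dict_exclude d1 keys → Pre_dict_exclude d1 keys → Spec_dict_exclude d1 keys (dict_exclude d1 keys)

-- ===== LEMMAS AND PROOFS =====

-- B's fold of erases is one filter over the items.
theorem alt_items (ks : List String) (l : List (String × Int)) :
    (ks.foldl (fun d k => d.erase k) (PySem.Dict.mk l)).items
      = l.filter (fun p => !ks.contains p.1) := by
  induction ks generalizing l with
  | nil => simp
  | cons k ks ih =>
      rw [List.foldl_cons]
      have herase : (PySem.Dict.mk l).erase k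
          = PySem.Dict.mk (l.filter (fun p => !(p.1 == k))) := rfl
      rw [herase, ih, List.filter_filter]
      apply List.filter_congr
      intro p _
      by_cases hpk : p.1 = k <;> by_cases hpm : p.1 ∈ ks <;>
        simp [hpk, hpm]

-- A's filtering copy loop appends, for each surviving entry, the pair (key, d1-lookup).
theorem loopA_items (d1 : List (String × Int)) (ks : List String)
    (l : List (String × Int)) (acc : PySem.Dict String Int)
    (hnd : (l.map Prod.fst).Nodup)
    (hfresh : ∀ p ∈ l, acc.contains p.1 = false) :
    (l.foldl
      (fun d kv =>
        if ks.contains kv.1 then d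
        else d.insert kv.1 ((PySem.Dict.mk d1).getD kv.1 0)) acc).items
      = acc.items
        ++ (l.filter (fun kv => !ks.contains kv.1)).map
             (fun kv => (kv.1, (PySem.Dict.mk d1).getD kv.1 0)) := by
  induction l generalizing acc with
  | nil => simp
  | cons kv l ih =>
      rw [List.foldl_cons]
      simp only [List.map_cons, List.nodup_cons] at hnd
      by_cases hk : ks.contains kv.1 = true
      · rw [if_pos hk, ih acc hnd.2 (fun p hp => hfresh p (List.mem_cons_of_mem _ hp)),
            List.filter_cons_of_neg (by simpa using hk)]
      · have hins := PySem.Dict.items_insert_of_not_contains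
          (d := acc) (k := kv.1) (v := (PySem.Dict.mk d1).getD kv.1 0)
          (hfresh kv (List.mem_cons_self))
        have hfresh' : ∀ p ∈ l,
            (acc.insert kv.1 ((PySem.Dict.mk d1).getD kv.1 0)).contains p.1 = false := by
          intro p hp
          have hne : p.1 ≠ kv.1 := by
            intro h
            exact hnd.1 (h ▸ List.mem_map_of_mem hp)
          simp [PySem.Dict.contains_insert, hne, hfresh p (List.mem_cons_of_mem _ hp)]
        rw [if_neg hk, ih _ hnd.2 hfresh', hins,
            List.filter_cons_of_pos (by simpa using hk), List.map_cons]
        simp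

-- Under Pre_, looking each surviving entry up in d1 returns its own value.
theorem map_lookup_filter (d1 : List (String × Int)) (ks : List String)
    (hnd : (d1.map Prod.fst).Nodup) :
    (d1.filter (fun kv => !ks.contains kv.1)).map
        (fun kv => (kv.1, (PySem.Dict.mk d1).getD kv.1 0))
      = d1.filter (fun kv => !ks.contains kv.1) := by
  have h : ∀ kv ∈ d1.filter (fun kv => !ks.contains kv.1),
      ((kv.1, (PySem.Dict.mk d1).getD kv.1 0) : String × Int) = kv := by
    intro kv hkv
    have hmem : kv ∈ d1 := List.mem_of_mem_filter hkv
    have hkeys : (PySem.Dict.mk d1).keys.Nodup := by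
      simpa [PySem.Dict.keys] using hnd
    have hv : (PySem.Dict.mk d1).getD kv.1 0 = kv.2 :=
      PySem.Dict.getD_of_mem_items (PySem.Dict.mk d1) (by simpa using hmem) hkeys 0
    simp [hv]
  calc (d1.filter (fun kv => !ks.contains kv.1)).map
          (fun kv => (kv.1, (PySem.Dict.mk d1).getD kv.1 0))
      = (d1.filter (fun kv => !ks.contains kv.1)).map id := List.map_congr_left h
    _ = _ := List.map_id _

-- List-level statement of the equivalence (keys already normalized).
theorem main_list (d1 : List (String × Int)) (ks : List String)
    (hnd : (d1.map Prod.fst).Nodup) :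
    (if ks.length = 0 then d1
     else if (PySem.Set.inter (PySem.Set.ofList ks) (d1.map Prod.fst)).length = 0 then d1
     else
       (d1.foldl
         (fun d kv =>
           if ks.contains kv.1 then d
           else d.insert kv.1 ((PySem.Dict.mk d1).getD kv.1 0))
         (PySem.Dict.empty : PySem.Dict String Int)).items)
      = (ks.foldl (fun d k => d.erase k) (PySem.Dict.mk d1)).items := by
  rw [alt_items]
  by_cases h0 : ks.length = 0
  · have hnil : ks = [] := List.length_eq_zero_iff.mp h0
    simp [hnil]
  · rw [if_neg h0]
    by_cases h1 : (PySem.Set.inter (PySem.Set.ofList ks) (d1.map Prod.fst)).length = 0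
    · -- no key of ks occurs in d1: the filter keeps everything
      have hempty : PySem.Set.inter (PySem.Set.ofList ks) (d1.map Prod.fst) = [] :=
        List.length_eq_zero_iff.mp h1
      rw [if_pos h1]
      symm
      apply List.filter_eq_self.mpr
      intro p hp
      cases hc : ks.contains p.1
      · rfl
      · exfalso
        have hmemks : p.1 ∈ ks := by simpa using hc
        have hmem : p.1 ∈ PySem.Set.inter (PySem.Set.ofList ks) (d1.map Prod.fst) :=
          (PySem.Set.mem_inter _ _ _).mpr
            ⟨(PySem.Set.mem_ofList ks p.1).mpr hmemks,
             List.mem_map_of_mem hp⟩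
        rw [hempty] at hmem
        exact List.not_mem_nil hmem
    · rw [if_neg h1,
          loopA_items d1 ks d1 PySem.Dict.empty hnd (by intro p _; simp),
          map_lookup_filter d1 ks hnd]
      simp [PySem.Dict.empty]

-- ===== VERDICT (by name: the statement is the Claim_ definition above) =====
theorem dict_exclude_spec : Claim_equal_dict_exclude := by
  intro d1 keys _hdom hpre
  have hnd : (d1.map Prod.fst).Nodup := hpre
  unfold Spec_dict_exclude dict_exclude dict_exclude_alt
  cases keys with
  | none => simpa using main_list d1 [] hnd

  | some ks => simpa using main_list d1 ks hnd
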